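-- pv_equiv track=rewrite | github.com/JiayuuWang/GeoPlan-bench | geoplan_bench/agents/ReAct.py | parse_tool_trajectory
-- ===== SOURCE A (Python) =====
-- from typing import Callable,List
--
-- def parse_tool_trajectory(history: str) -> List[str]:
--     tool_trajectory = []
--     for step in history.split("\n"):
--         if step.startswith("Action:"):
--             action_content = step.split("Action: ")[1]
--             if action_content == "FINISH":
--                 break
--             else:
--                 # Extract tool name, remove parameter part
--                 tool_name = action_content.split("(")[0]
--                 tool_trajectory.append(tool_name)
--     return tool_trajectory
-- ===== SOURCE B (Python) =====
-- from typing import List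
--
-- def parse_tool_trajectory(history: str) -> List[str]:
--     # Staged two-pass approach: pass 1 locates the FINISH cutoff line; pass 2
--     # independently slices the prefix and extracts tool names from it.
--     lines = history.split("\n")
--     cut = len(lines)
--     for i, line in enumerate(lines):
--         if line.startswith("Action:") and line.split("Action: ")[1] == "FINISH":
--             cut = i
--             break
--     return [l.split("Action: ")[1].split("(")[0]
--             for l in lines[:cut] if l.startswith("Action:")]
-- ===== Notes on version B (the rewrite author's own statement) =====
-- stated objective: alternative
-- what changed: Replaced the single fused loop-with-break by two staged passes: a first scan that only locates the FINISH cutoff index, then an independent slice+filter+map over the prefix that extracts the tool names.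
import Mathlib
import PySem

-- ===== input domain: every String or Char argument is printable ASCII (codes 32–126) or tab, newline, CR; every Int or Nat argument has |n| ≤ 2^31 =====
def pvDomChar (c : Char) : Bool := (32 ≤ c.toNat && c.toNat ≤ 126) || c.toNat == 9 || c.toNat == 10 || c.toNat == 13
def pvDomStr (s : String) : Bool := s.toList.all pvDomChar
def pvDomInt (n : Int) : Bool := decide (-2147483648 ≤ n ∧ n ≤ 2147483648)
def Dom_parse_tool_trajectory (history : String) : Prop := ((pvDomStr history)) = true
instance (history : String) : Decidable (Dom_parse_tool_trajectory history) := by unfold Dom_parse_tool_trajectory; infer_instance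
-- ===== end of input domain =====

-- B replaces A's fused loop-with-break by two staged passes: find the FINISH cutoff index, then slice+filter+map (alternative decomposition; same cost).


-- ===== PORT A =====
-- the for-loop with break, as structural recursion over the lines
def pvAGo (lines : List String) : List String :=
  match lines with
  | [] => []
  | step :: rest =>
    if PySem.Str.startswith step "Action:" then
      match PySem.List.pyGet? ((PySem.Str.split? step "Action: ").getD []) 1 with
      | none => []                                   -- Python raises IndexError here (excluded by Pre_)
      | some action_content =>
        if action_content == "FINISH" then []        -- break
        else ((PySem.List.pyGet? ((PySem.Str.split? action_content "(").getD []) 0).getD "") :: pvAGo rest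
    else pvAGo rest

def parse_tool_trajectory (history : String) : List String :=
  pvAGo ((PySem.Str.split? history "\n").getD [])

-- ===== PORT B =====
-- pass 1 of Source B: scan for the FINISH cutoff index (the loop with break, as recursion counting lines)
def pvBCut (lines : List String) : Nat :=
  match lines with
  | [] => 0
  | line :: rest =>
    if PySem.Str.startswith line "Action:" then
      match PySem.List.pyGet? ((PySem.Str.split? line "Action: ").getD []) 1 with
      | none => 0                                    -- Python raises IndexError here (excluded by Pre_)
      | some c => if c == "FINISH" then 0 else pvBCut rest + 1
    else pvBCut rest + 1

-- pass 2 of Source B: slice the prefix, keep action lines, extract tool names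
def parse_tool_trajectory_alt (history : String) : List String :=
  let lines := (PySem.Str.split? history "\n").getD []
  let cut := pvBCut lines
  ((lines.take cut).filter (fun l => PySem.Str.startswith l "Action:")).map
    (fun l => (PySem.List.pyGet?
        ((PySem.Str.split? ((PySem.List.pyGet? ((PySem.Str.split? l "Action: ").getD []) 1).getD "") "(").getD []) 0).getD "")

-- ===== PRECONDITION & SPEC =====
-- Pre_ excludes exactly the inputs where A raises IndexError: a line starting with "Action:" but not
-- containing "Action: " that is reached before a FINISH action line; B raises there too.
def Pre_parse_tool_trajectory (history : String) : Prop :=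
  let lines := (PySem.Str.split? history "\n").getD []
  ∀ i < lines.length,
    (PySem.Str.startswith lines[i]! "Action:" = true ∧
     PySem.List.pyGet? ((PySem.Str.split? lines[i]! "Action: ").getD []) 1 = none) →
    ∃ j < i, PySem.Str.startswith lines[j]! "Action:" = true ∧
      PySem.List.pyGet? ((PySem.Str.split? lines[j]! "Action: ").getD []) 1 = some "FINISH"
instance (history : String) : Decidable (Pre_parse_tool_trajectory history) := by
  unfold Pre_parse_tool_trajectory; infer_instance

def pvWitness_parse_tool_trajectory : String :=
  "Thought: t\nAction: search(q)\nObservation: o\nAction: FINISH"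

def Spec_parse_tool_trajectory (history : String) (out : List String) : Prop := out = parse_tool_trajectory_alt history
instance (history : String) (out : List String) : Decidable (Spec_parse_tool_trajectory history out) := by unfold Spec_parse_tool_trajectory; infer_instance

-- ===== CLAIM (what is proved, stated in full; the proofs are below) =====
def Claim_equal_parse_tool_trajectory : Prop := ∀ (history : String), Dom_parse_tool_trajectory history → Pre_parse_tool_trajectory history → Spec_parse_tool_trajectory history (parse_tool_trajectory history)

-- ===== LEMMAS AND PROOFS =====
-- A's single loop equals B's cutoff + slice + filter + map stages (the ports even agree at the
-- IndexError cut-off, so the equality holds for all line lists)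
theorem pvAGo_eq_staged (lines : List String) :
    pvAGo lines =
      ((lines.take (pvBCut lines)).filter (fun l => PySem.Str.startswith l "Action:")).map
        (fun l => (PySem.List.pyGet?
            ((PySem.Str.split? ((PySem.List.pyGet? ((PySem.Str.split? l "Action: ").getD []) 1).getD "") "(").getD []) 0).getD "") := by
  induction lines with
  | nil => rfl
  | cons step rest ih =>
    cases h : PySem.Str.startswith step "Action:" with
    | false =>
      simp at h
      simp [pvAGo, pvBCut, h, ih, List.take_succ_cons]
    | true =>
      simp at h
      cases hg : PySem.List.pyGet? ((PySem.Str.split? step "Action: ").getD []) 1 with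
      | none => simp [pvAGo, pvBCut, h, hg]
      | some c =>
        by_cases hc : (c == "FINISH") = true
        · simp at hc
          simp [pvAGo, pvBCut, h, hg, hc]
        · simp [pvAGo, pvBCut, h, hg, hc, ih, List.take_succ_cons]

-- ===== VERDICT (by name: the statement is the Claim_ definition above) =====
theorem parse_tool_trajectory_spec : Claim_equal_parse_tool_trajectory := by
  intro history _ _
  unfold Spec_parse_tool_trajectory parse_tool_trajectory parse_tool_trajectory_alt
  exact pvAGo_eq_staged _
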